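-- pv_equiv track=rewrite | github.com/Gregory-Schwing-MD-PhD/SmallMoleculeResearch | DATABASES/DLiP/scrape_dlip.py | generate_ids
-- ===== SOURCE A (Python) =====
-- def int_to_base36(n: int) -> str:
--     chars = "0123456789ABCDEFGHIJKLMNOPQRSTUVWXYZ"
--     if n == 0:
--         return "0"
--     digits = []
--     while n > 0:
--         n, r = divmod(n, 36)
--         digits.append(chars[r])
--     return "".join(reversed(digits))
--
-- def generate_ids(num=None):
--     start = int("00000", 36)
--     end   = int("00BQL", 36)  # inclusive
--     count = 0
--     for i in range(start, end + 1):
--         if num is not None and count >= num: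
--             break
--         yield f"D{int_to_base36(i).zfill(5)}"
--         count += 1
-- ===== SOURCE B (Python) =====
-- def generate_ids(num=None):
--     chars = "0123456789ABCDEFGHIJKLMNOPQRSTUVWXYZ"
--     digits = [0, 0, 0, 0, 0]  # base-36 digit indices, least significant first
--     for count in range(15214):
--         if num is not None and count >= num:
--             break
--         yield "D" + "".join(chars[d] for d in reversed(digits))
--         # odometer increment, base 36
--         for i in range(5):
--             if digits[i] < 35:
--                 digits[i] += 1
--                 break
--             digits[i] = 0
-- ===== Notes on version B (the rewrite author's own statement) =====
-- stated objective: alternative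
-- what changed: Replaces the per-ID repeated-divmod base-36 conversion plus zfill with a 5-digit base-36 odometer (list of digit indices) that is incremented with carry propagation between yields, building each ID directly from the digit table.
import Mathlib
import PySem

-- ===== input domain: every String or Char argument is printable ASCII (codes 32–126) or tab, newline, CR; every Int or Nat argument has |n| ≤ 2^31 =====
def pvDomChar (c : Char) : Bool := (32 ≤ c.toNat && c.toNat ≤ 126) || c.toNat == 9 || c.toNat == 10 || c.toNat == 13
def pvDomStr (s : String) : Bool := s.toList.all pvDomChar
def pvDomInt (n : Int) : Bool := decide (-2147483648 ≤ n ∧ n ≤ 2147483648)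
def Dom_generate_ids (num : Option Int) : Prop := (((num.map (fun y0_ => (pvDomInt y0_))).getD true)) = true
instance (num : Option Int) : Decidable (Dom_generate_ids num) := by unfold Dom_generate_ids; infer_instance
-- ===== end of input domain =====

-- B replaces A's per-ID repeated-divmod base-36 conversion + zfill by a 5-digit base-36
-- odometer of digit indices incremented with carry between yields (objective: alternative).
-- Both Pythons are generators; the ports return the list of yielded values.

-- ===== PORT A =====

-- chars[i] (Python string indexing; every call site has 0 ≤ i < 36, so the default is never used)
def pvCharAt (i : Int) : Char :=
  (PySem.Str.pyGet? "0123456789ABCDEFGHIJKLMNOPQRSTUVWXYZ" i).getD '0'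

-- int(s, 36): hand-ported base-36 parse; exact for the uppercase alphanumeric literals used here
def pvParse36 (s : List Char) : Int :=
  s.foldl (fun acc c =>
    acc * 36 + (("0123456789ABCDEFGHIJKLMNOPQRSTUVWXYZ".toList.idxOf c : Nat) : Int)) 0

-- the 'while n > 0: n, r = divmod(n, 36); digits.append(chars[r])' loop (digits LSB first)
def pvB36Loop (n : Int) : List Char :=
  if h : 0 < n then
    pvCharAt (PySem.Int.mod n 36) :: pvB36Loop (PySem.Int.floordiv n 36)
  else []
termination_by n.toNat
decreasing_by
  rw [PySem.Int.floordiv_eq_ediv_of_pos (by norm_num)]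
  omega

def int_to_base36 (n : Int) : String :=
  if n = 0 then "0" else String.ofList (pvB36Loop n).reverse

-- s.zfill(w): exact for the unsigned digit strings produced above (no '+'/'-' handling needed)
def pvZfill (s : String) (w : Nat) : String :=
  String.ofList (List.replicate (w - s.toList.length) '0' ++ s.toList)

def generate_ids (num : Option Int) : List String :=
  let start : Int := pvParse36 "00000".toList
  let end_ : Int := pvParse36 "00BQL".toList
  ((PySem.List.pyRange start (end_ + 1) 1).foldl
    (fun (st : Int × List String) i =>
      match num with
      | some n =>
          if st.1 ≥ n then st
          else (st.1 + 1, st.2 ++ [String.ofList ('D' :: (pvZfill (int_to_base36 i) 5).toList)])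
      | none => (st.1 + 1, st.2 ++ [String.ofList ('D' :: (pvZfill (int_to_base36 i) 5).toList)]))
    (0, [])).2

-- ===== PORT B =====

-- the inner 'for i in range(5)' carry loop: first digit < 35 is bumped, lower ones reset to 0
def pvOdoInc : List Int → List Int
  | [] => []
  | d :: rest => if d < 35 then (d + 1) :: rest else 0 :: pvOdoInc rest

-- "D" + "".join(chars[d] for d in reversed(digits))
def pvIdStr (digits : List Int) : String :=
  String.ofList ('D' :: digits.reverse.map pvCharAt)

def generate_ids_alt (num : Option Int) : List String :=
  ((PySem.List.pyRange 0 15214 1).foldl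
    (fun (st : List Int × List String) count =>
      match num with
      | some n => if count ≥ n then st else (pvOdoInc st.1, st.2 ++ [pvIdStr st.1])
      | none => (pvOdoInc st.1, st.2 ++ [pvIdStr st.1]))
    ([0, 0, 0, 0, 0], [])).2

-- ===== PRECONDITION & SPEC =====
def Spec_generate_ids (num : Option Int) (out : List String) : Prop := out = generate_ids_alt num
instance (num : Option Int) (out : List String) : Decidable (Spec_generate_ids num out) := by unfold Spec_generate_ids; infer_instance

-- ===== CLAIM (what is proved, stated in full; the proofs are below) =====
def Claim_equal_generate_ids : Prop := ∀ (num : Option Int), Dom_generate_ids num → Spec_generate_ids num (generate_ids num)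

-- ===== LEMMAS AND PROOFS =====

-- the A-side and B-side loop bodies, named so the fold lemmas can speak about them
def pvStepA (num : Option Int) (st : Int × List String) (i : Int) : Int × List String :=
  match num with
  | some n =>
      if st.1 ≥ n then st
      else (st.1 + 1, st.2 ++ [String.ofList ('D' :: (pvZfill (int_to_base36 i) 5).toList)])
  | none => (st.1 + 1, st.2 ++ [String.ofList ('D' :: (pvZfill (int_to_base36 i) 5).toList)])

def pvStepB (num : Option Int) (st : List Int × List String) (count : Int) : List Int × List String :=
  match num with
  | some n => if count ≥ n then st else (pvOdoInc st.1, st.2 ++ [pvIdStr st.1])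
  | none => (pvOdoInc st.1, st.2 ++ [pvIdStr st.1])

theorem pvFoldlCongr {A B : Type} {f g : A → B → A} (h : ∀ a b, f a b = g a b) :
    ∀ (l : List B) (init : A), l.foldl f init = l.foldl g init := by
  intro l
  induction l with
  | nil => intro init; rfl
  | cons a l ih => intro init; simp only [List.foldl_cons, h, ih]

theorem genA_eq (num : Option Int) :
    generate_ids num = ((PySem.List.pyRange 0 15214 1).foldl (pvStepA num) (0, [])).2 := by
  have h1 : pvParse36 "00000".toList = 0 := by decide
  have h2 : pvParse36 "00BQL".toList = 15213 := by decide
  simp only [generate_ids, h1, h2]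
  norm_num
  refine congrArg Prod.snd (pvFoldlCongr ?_ _ _)
  intro st i
  cases num <;> rfl

theorem genB_eq (num : Option Int) :
    generate_ids_alt num = ((PySem.List.pyRange 0 15214 1).foldl (pvStepB num) ([0, 0, 0, 0, 0], [])).2 := by
  unfold generate_ids_alt
  refine congrArg Prod.snd (pvFoldlCongr ?_ _ _)
  intro st count
  cases num <;> rfl

-- k-digit base-36 representation of n, least significant first, as Int digit values
def repK : Nat → Nat → List Int
  | 0, _ => []
  | k + 1, n => ((n % 36 : Nat) : Int) :: repK k (n / 36)

-- A's digit list (LSB first) as digit values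
def b36n (n : Nat) : List Int :=
  if n = 0 then [] else ((n % 36 : Nat) : Int) :: b36n (n / 36)
termination_by n
decreasing_by omega

theorem repK_zero (k : Nat) : repK k 0 = List.replicate k 0 := by
  induction k with
  | zero => rfl
  | succ k ih => simp [repK, ih, List.replicate_succ]

theorem odoInc_repK (k n : Nat) (h : n + 1 ≤ 36 ^ k) :
    pvOdoInc (repK k n) = repK k (n + 1) := by
  induction k generalizing n with
  | zero =>
    simp [pow_zero] at h
    simp [repK, pvOdoInc]
  | succ k ih =>
    simp only [repK, pvOdoInc]
    by_cases h35 : n % 36 = 35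
    · have hq : n / 36 + 1 ≤ 36 ^ k := by
        have h36 : n = 36 * (n / 36) + 35 := by omega
        have : (36 : Nat) ^ (k + 1) = 36 * 36 ^ k := by ring
        omega
      have h1 : ¬ (((n % 36 : Nat) : Int) < 35) := by omega
      have h2 : (n + 1) % 36 = 0 := by omega
      have h3 : (n + 1) / 36 = n / 36 + 1 := by omega
      rw [if_neg h1, h2, h3, ih _ hq]
      simp
    · have h1 : ((n % 36 : Nat) : Int) < 35 := by
        have := Nat.mod_lt n (y := 36) (by norm_num); omega
      have h2 : (n + 1) % 36 = n % 36 + 1 := by omega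
      have h3 : (n + 1) / 36 = n / 36 := by omega
      rw [if_pos h1, h2, h3]
      norm_cast

theorem b36n_length (k n : Nat) (h : n < 36 ^ k) : (b36n n).length ≤ k := by
  induction k generalizing n with
  | zero =>
    simp [pow_zero] at h
    simp [h, b36n]
  | succ k ih =>
    by_cases h0 : n = 0
    · simp [h0, b36n]
    · rw [b36n, if_neg h0]
      have : n / 36 < 36 ^ k := by
        have : (36 : Nat) ^ (k + 1) = 36 * 36 ^ k := by ring
        omega
      simpa using ih _ this

theorem pad_b36n (k n : Nat) (h : n < 36 ^ k) :
    b36n n ++ List.replicate (k - (b36n n).length) 0 = repK k n := by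
  induction k generalizing n with
  | zero =>
    simp [pow_zero] at h
    simp [h, b36n, repK]
  | succ k ih =>
    by_cases h0 : n = 0
    · subst h0
      simp [b36n, repK_zero]
    · rw [b36n, if_neg h0]
      have hq : n / 36 < 36 ^ k := by
        have : (36 : Nat) ^ (k + 1) = 36 * 36 ^ k := by ring
        omega
      simp only [repK, List.length_cons, List.cons_append, List.cons.injEq, true_and]
      have hlen : (b36n (n / 36)).length ≤ k := b36n_length k _ hq
      have : k + 1 - ((b36n (n / 36)).length + 1) = k - (b36n (n / 36)).length := by omega
      rw [this]
      exact ih _ hq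

theorem b36loop_natCast (n : Nat) : pvB36Loop (n : Int) = (b36n n).map pvCharAt := by
  induction n using Nat.strong_induction_on with
  | _ n ih =>
    by_cases h0 : n = 0
    · subst h0
      rw [pvB36Loop, b36n]
      simp
    · rw [pvB36Loop, b36n, if_neg h0, dif_pos (by exact_mod_cast Nat.pos_of_ne_zero h0)]
      have hmod : PySem.Int.mod (n : Int) 36 = ((n % 36 : Nat) : Int) := by
        rw [PySem.Int.mod_eq_emod_of_pos (by norm_num)]; omega
      have hdiv : PySem.Int.floordiv (n : Int) 36 = ((n / 36 : Nat) : Int) := by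
        rw [PySem.Int.floordiv_eq_ediv_of_pos (by norm_num)]; omega
      rw [hmod, hdiv, ih (n / 36) (by omega)]
      simp

theorem pvCharAt_zero : pvCharAt 0 = '0' := by decide

-- A's string for index n equals B's string from the 5-digit odometer state repK 5 n
theorem string_step (n : Nat) (h : n < 36 ^ 5) :
    String.ofList ('D' :: (pvZfill (int_to_base36 (n : Int)) 5).toList) = pvIdStr (repK 5 n) := by
  unfold pvIdStr
  refine congrArg String.ofList (congrArg ('D' :: ·) ?_)
  by_cases h0 : n = 0
  · subst h0
    rw [repK_zero]
    decide
  · rw [int_to_base36, if_neg (by exact_mod_cast h0), pvZfill]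
    rw [show (String.ofList (pvB36Loop (n : Int)).reverse).toList = (pvB36Loop (n : Int)).reverse from by simp]
    rw [b36loop_natCast, ← pad_b36n 5 n h]
    simp [List.reverse_append, List.reverse_replicate, List.map_append, List.map_replicate,
      List.map_reverse, pvCharAt_zero]

-- once A's counter has reached the bound, the rest of the loop does nothing
theorem skipA (n : Int) (L : List Int) (st : Int × List String) (h : st.1 ≥ n) :
    L.foldl (pvStepA (some n)) st = st := by
  induction L with
  | nil => rfl
  | cons a L ih => simp [List.foldl_cons, pvStepA, h, ih]

-- once B's loop index has reached the bound, the rest of the loop does nothing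
theorem skipB (n : Int) (L : List Int) (st : List Int × List String)
    (h : ∀ i ∈ L, i ≥ n) :
    L.foldl (pvStepB (some n)) st = st := by
  induction L with
  | nil => rfl
  | cons a L ih =>
    simp only [List.foldl_cons, pvStepB, if_pos (h a (by simp))]
    exact ih (fun i hi => h i (by simp [hi]))

-- core invariant: over a break-free segment, A's counter tracks the index, B's digits
-- track repK 5 of the index, and both emit the same strings
theorem seg (num : Option Int) (k : Nat) : ∀ (j : Nat) (out : List String),
    j + k ≤ 36 ^ 5 → (∀ n, num = some n → ((j : Int) + (k : Int) ≤ n)) →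
    ∃ Y, (PySem.List.pyRange (j : Int) ((j : Int) + (k : Int)) 1).foldl (pvStepA num) ((j : Int), out)
            = (((j + k : Nat) : Int), Y)
      ∧ (PySem.List.pyRange (j : Int) ((j : Int) + (k : Int)) 1).foldl (pvStepB num) (repK 5 j, out)
            = (repK 5 (j + k), Y) := by
  induction k with
  | zero =>
    intro j out _ _
    have hnil : PySem.List.pyRange (j : Int) ((j : Int) + ((0 : Nat) : Int)) 1 = [] :=
      PySem.List.pyRange_one_eq_nil (by push_cast; omega)
    refine ⟨out, ?_, ?_⟩ <;> rw [hnil] <;> rfl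
  | succ k ih =>
    intro j out hbound hnum
    have hcons : PySem.List.pyRange (j : Int) ((j : Int) + ((k + 1 : Nat) : Int)) 1
        = (j : Int) :: PySem.List.pyRange ((j : Int) + 1) ((j : Int) + ((k + 1 : Nat) : Int)) 1 := by
      exact PySem.List.pyRange_one_cons (by push_cast; omega)
    have hjlt : j < 36 ^ 5 := by omega
    have hstr := string_step j hjlt
    have hA1 : pvStepA num ((j : Int), out) (j : Int)
        = ((j : Int) + 1, out ++ [pvIdStr (repK 5 j)]) := by
      cases num with
      | none => simp [pvStepA, hstr]
      | some n =>
        have : ¬ ((j : Int) ≥ n) := by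
          have := hnum n rfl; push_cast at this ⊢; omega
        simp [pvStepA, this, hstr]
    have hB1 : pvStepB num (repK 5 j, out) (j : Int)
        = (repK 5 (j + 1), out ++ [pvIdStr (repK 5 j)]) := by
      have hodo : pvOdoInc (repK 5 j) = repK 5 (j + 1) := odoInc_repK 5 j (by omega)
      cases num with
      | none => simp [pvStepB, hodo]
      | some n =>
        have : ¬ ((j : Int) ≥ n) := by
          have := hnum n rfl; push_cast at this ⊢; omega
        simp [pvStepB, this, hodo]
    have hend : (j : Int) + ((k + 1 : Nat) : Int) = ((j + 1 : Nat) : Int) + (k : Int) := by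
      push_cast; ring
    obtain ⟨Y, hYA, hYB⟩ := ih (j + 1) (out ++ [pvIdStr (repK 5 j)]) (by omega)
      (fun n hn => by have := hnum n hn; push_cast at this ⊢; omega)
    refine ⟨Y, ?_, ?_⟩
    · rw [hcons, List.foldl_cons, hA1, hend]
      have : ((j : Int) + 1) = ((j + 1 : Nat) : Int) := by push_cast; ring
      rw [this, hYA]
      congr 1
      push_cast; ring
    · rw [hcons, List.foldl_cons, hB1, hend]
      rw [show ((j : Int) + 1) = ((j + 1 : Nat) : Int) from by push_cast; ring, hYB]
      congr 2
      omega

theorem main_eq (num : Option Int) : generate_ids num = generate_ids_alt num := by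
  rw [genA_eq, genB_eq]
  have hrepK0 : repK 5 0 = [0, 0, 0, 0, 0] := by decide
  cases num with
  | none =>
    obtain ⟨Y, hA, hB⟩ := seg none 15214 0 [] (by norm_num) (fun n hn => by cases hn)
    push_cast at hA hB
    rw [hrepK0] at hB
    rw [hA, hB]
  | some n =>
    by_cases hle : n ≤ 0
    · rw [skipA n _ (0, []) (by simpa using hle),
        skipB n _ ([0, 0, 0, 0, 0], []) (fun i hi => by
          rw [PySem.List.mem_pyRange_one] at hi; omega)]
    · by_cases hbig : 15214 ≤ n
      · obtain ⟨Y, hA, hB⟩ := seg (some n) 15214 0 [] (by norm_num)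
          (fun m hm => by injection hm with hm; subst hm; push_cast; omega)
        push_cast at hA hB
        rw [hrepK0] at hB
        rw [hA, hB]
      · -- 0 < n < 15214: the loop breaks after n yields
        have hn0 : 0 < n := by omega
        have hn1 : n < 15214 := by omega
        have hsplit : PySem.List.pyRange 0 15214 1
            = PySem.List.pyRange 0 n 1 ++ PySem.List.pyRange n 15214 1 :=
          PySem.List.pyRange_one_append 0 n 15214 (by omega) (by omega)
        obtain ⟨Y, hA, hB⟩ := seg (some n) n.toNat 0 []
          (by simp only [show (36:Nat)^5 = 60466176 from by norm_num]; omega)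
          (fun m hm => by injection hm with hm; subst hm; push_cast; omega)
        have hcast : ((n.toNat : Nat) : Int) = n := by omega
        rw [hsplit, List.foldl_append, List.foldl_append]
        push_cast [hcast] at hA hB
        simp only [zero_add] at hA hB
        rw [hrepK0] at hB
        rw [hA, hB]
        rw [skipA n _ _ (by simp),
          skipB n _ _ (fun i hi => by rw [PySem.List.mem_pyRange_one] at hi; omega)]

-- ===== VERDICT (by name: the statement is the Claim_ definition above) =====
theorem generate_ids_spec : Claim_equal_generate_ids := by
  intro num _
  unfold Spec_generate_ids
  exact main_eq num
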